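-- pv_equiv track=rewrite | github.com/GoldenSparrow12/Python | 41evenodd.py | count
-- ===== SOURCE A (Python) =====
-- def count(lst):
--         more=0
--         less=0
--         for i in lst:
--                 if(len(i)<5):
--                         less+=1
--                 else:
--                         more+=1
--         return more,less
-- ===== SOURCE B (Python) =====
-- def count(lst):
--     freq = {}
--     for x in lst:
--         n = len(x)
--         freq[n] = freq.get(n, 0) + 1
--     more = sum(c for n, c in freq.items() if n >= 5)
--     less = sum(c for n, c in freq.items() if n < 5)
--     return more, less
-- ===== Notes on version B (the rewrite author's own statement) =====
-- stated objective: alternative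
-- what changed: B builds a histogram of string lengths in a dict first and then derives both counts by summing the histogram's entries below/at-or-above 5, instead of A's single loop with two branch-incremented counters.
import Mathlib
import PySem

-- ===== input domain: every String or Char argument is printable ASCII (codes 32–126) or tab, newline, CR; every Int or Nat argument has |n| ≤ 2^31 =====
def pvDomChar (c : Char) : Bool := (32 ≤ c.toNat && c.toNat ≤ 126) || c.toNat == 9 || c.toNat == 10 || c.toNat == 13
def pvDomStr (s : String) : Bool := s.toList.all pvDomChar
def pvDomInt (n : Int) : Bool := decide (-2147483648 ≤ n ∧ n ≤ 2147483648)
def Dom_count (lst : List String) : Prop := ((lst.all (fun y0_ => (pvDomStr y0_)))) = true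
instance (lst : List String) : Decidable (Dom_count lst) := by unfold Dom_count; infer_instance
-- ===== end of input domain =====

-- B first builds a length histogram (dict) and then sums its entries below / at-or-above 5 (alternative staged algorithm, same O(n) cost).

-- ===== PORT A =====
def count (lst : List String) : Int × Int :=
  lst.foldl (fun (st : Int × Int) i =>
    if PySem.Str.len i < 5 then (st.1, st.2 + 1) else (st.1 + 1, st.2)) (0, 0)

-- ===== PORT B =====
def count_alt (lst : List String) : Int × Int :=
  let freq := lst.foldl (fun (d : PySem.Dict Int Int) x =>
      d.insert (PySem.Str.len x) (d.getD (PySem.Str.len x) 0 + 1)) PySem.Dict.empty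
  let more := ((freq.items.filter (fun p => 5 ≤ p.1)).map (·.2)).sum
  let less := ((freq.items.filter (fun p => p.1 < 5)).map (·.2)).sum
  (more, less)

-- ===== PRECONDITION & SPEC =====
def Spec_count (lst : List String) (out : Int × Int) : Prop := out = count_alt lst
instance (lst : List String) (out : Int × Int) : Decidable (Spec_count lst out) := by unfold Spec_count; infer_instance

-- ===== CLAIM (what is proved, stated in full; the proofs are below) =====
def Claim_equal_count : Prop := ∀ (lst : List String), Dom_count lst → Spec_count lst (count lst)

-- ===== LEMMAS AND PROOFS =====

-- the histogram fold is Counter(map len lst)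
lemma freq_eq_counter (lst : List String) :
    lst.foldl (fun (d : PySem.Dict Int Int) x =>
      d.insert (PySem.Str.len x) (d.getD (PySem.Str.len x) 0 + 1)) PySem.Dict.empty
      = PySem.Dict.counter (lst.map PySem.Str.len) := by
  rw [← PySem.Dict.foldl_insert_getD_add_one_eq_counter, List.foldl_map]

-- summing the histogram's entries whose key satisfies p counts the elements satisfying p
lemma sum_counts (ks : List Int) (p : Int → Bool) :
    (((PySem.Set.ofList ks).filter p).map (fun k => (ks.count k : Int))).sum
      = (ks.countP p : Int) := by
  have hperm : ks.dedup.Perm (PySem.Set.ofList ks) := by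
    rw [List.perm_ext_iff_of_nodup ks.nodup_dedup (PySem.Set.nodup_ofList ks)]
    intro a
    simp [PySem.Set.mem_ofList, List.mem_dedup]
  have h2 := ((hperm.filter p).map (fun k => (ks.count k : Int))).sum_eq
  rw [← h2]
  have h3 := List.sum_map_count_dedup_filter_eq_countP p ks
  have : ((ks.dedup.filter p).map (fun k => (ks.count k : Int))).sum
      = (((ks.dedup.filter p).map (fun k => ks.count k)).sum : Int) := by
    rw [Nat.cast_list_sum, List.map_map]; rfl
  rw [this, h3]

-- A's loop as two countP's
lemma count_loop (lst : List String) (m l : Int) :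
    lst.foldl (fun (st : Int × Int) i =>
      if PySem.Str.len i < 5 then (st.1, st.2 + 1) else (st.1 + 1, st.2)) (m, l)
      = (m + (lst.countP (fun x => !decide (PySem.Str.len x < 5)) : Int),
         l + (lst.countP (fun x => decide (PySem.Str.len x < 5)) : Int)) := by
  induction lst generalizing m l with
  | nil => simp
  | cons a t ih =>
    simp only [List.foldl_cons, List.countP_cons]
    by_cases h : PySem.Str.len a < 5
    · rw [if_pos h, ih]
      simp only [h, decide_true, Bool.not_true, Prod.mk.injEq]
      constructor <;> push_cast <;> ring
    · rw [if_neg h, ih]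
      simp only [h, decide_false, Bool.not_false, Prod.mk.injEq]
      constructor <;> push_cast <;> ring

-- ===== VERDICT (by name: the statement is the Claim_ definition above) =====
theorem count_spec : Claim_equal_count := by
  intro lst _
  unfold Spec_count count count_alt
  rw [freq_eq_counter, count_loop]
  simp only [PySem.Dict.items_counter, List.filter_map, List.map_map, Function.comp_def]
  rw [sum_counts (lst.map PySem.Str.len) (fun k => decide (5 ≤ k)),
      sum_counts (lst.map PySem.Str.len) (fun k => decide (k < 5)),
      List.countP_map, List.countP_map]
  have h5 : ((fun k => decide ((5:Int) ≤ k)) ∘ PySem.Str.len)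
      = (fun x => !decide (PySem.Str.len x < 5)) := by
    funext x
    simp only [Function.comp_apply, ← decide_not, decide_eq_decide, PySem.Str.len]
    omega
  have h6 : ((fun k => decide ((k:Int) < 5)) ∘ PySem.Str.len)
      = (fun x => decide (PySem.Str.len x < 5)) := rfl
  rw [h5, h6]
  simp
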